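-- pv_equiv track=rewrite | github.com/hyes92121/Automated-Classification-of-Onion-Sites | myATOL.py | DedupData
-- ===== SOURCE A (Python) =====
-- from collections import defaultdict
--
-- def DedupData(data, T):
--     dedup_data = defaultdict(lambda:defaultdict(int))
--     # Create transpose of title hash T.
--     Tt = {}
--     for (onion, title) in list(T.items()):
--         title_str = ' '.join(title)
--         if title_str in Tt:
--             Tt[title_str].append(onion)
--         else:
--             Tt[title_str] = [onion]
--     # Create map of title to onion with largest word list.
--     Tmax = {}
--     for (title_str, onions) in list(Tt.items()):
--         selected_onion = 0
--         max_value = 0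
--         for onion in onions:
--             if len(data[onion]) > max_value:
--                 max_value = len(data[onion])
--                 selected_onion = onion
--         Tmax[selected_onion] = title_str
--     for (onion, val) in list(data.items()):
--         if onion in Tmax:
--             dedup_data[onion] = val
--     return dedup_data
-- ===== SOURCE B (Python) =====
-- def DedupData(data, T):
--     # One fused pass over T: running (selected_onion, max_len) per title string.
--     best = {}
--     for onion, title in T.items():
--         ts = ' '.join(title)
--         sel, mx = best.get(ts, (None, 0))
--         n = len(data[onion])
--         if n > mx:
--             sel, mx = onion, n
--         best[ts] = (sel, mx)
--     selected = {s for s, _ in best.values() if s is not None}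
--     return {o: v for o, v in data.items() if o in selected}
-- ===== Notes on version B (the rewrite author's own statement) =====
-- stated objective: alternative
-- what changed: B fuses A's two-phase scheme (build the title->onions transpose Tt, then rescan each group for its max-word-count onion) into a single pass over T that keeps a running (selected_onion, max_len) pair per title string, then filters data by the resulting selected set.
import Mathlib
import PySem

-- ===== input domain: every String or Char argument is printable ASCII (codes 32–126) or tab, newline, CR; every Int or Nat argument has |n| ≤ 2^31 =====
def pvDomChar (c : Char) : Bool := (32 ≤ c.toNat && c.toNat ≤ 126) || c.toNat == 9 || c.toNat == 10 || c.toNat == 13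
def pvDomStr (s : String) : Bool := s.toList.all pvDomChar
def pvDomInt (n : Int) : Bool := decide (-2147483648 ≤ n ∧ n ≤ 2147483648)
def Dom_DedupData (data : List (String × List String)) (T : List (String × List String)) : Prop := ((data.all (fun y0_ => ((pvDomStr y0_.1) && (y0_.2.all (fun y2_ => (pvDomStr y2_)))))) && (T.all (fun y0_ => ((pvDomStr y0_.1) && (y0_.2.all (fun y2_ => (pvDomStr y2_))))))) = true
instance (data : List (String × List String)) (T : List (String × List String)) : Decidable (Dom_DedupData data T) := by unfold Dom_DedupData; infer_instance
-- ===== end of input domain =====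

-- B fuses A's transpose-then-per-group-max two-pass scheme into one pass keeping a running
-- (selected, max_len) pair per title string; same return value on Pre_ (where no KeyError occurs).

-- ===== PORT A =====
-- body of A's Tt loop (transpose of T: title string -> list of onions)
def aTtStep (tt : PySem.Dict String (List String)) (p : String × List String) : PySem.Dict String (List String) :=
  let ts := PySem.Str.join " " p.2
  if tt.contains ts then tt.insert ts (tt.getD ts [] ++ [p.1])
  else tt.insert ts [p.1]

-- body of A's inner max scan (`if len(data[onion]) > max_value`)
def aSelStep (dataD : PySem.Dict String (List String)) (s : Option String × Int) (o : String) : Option String × Int :=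
  let n : Int := ((dataD.getD o []).length : Int)
  if n > s.2 then (some o, n) else s

-- body of A's Tmax loop; the int key 0 becomes `none` (a Python int key no string onion equals)
def aTmaxStep (dataD : PySem.Dict String (List String)) (tm : PySem.Dict (Option String) String) (q : String × List String) : PySem.Dict (Option String) String :=
  tm.insert ((q.2.foldl (aSelStep dataD) ((none : Option String), (0 : Int))).1) q.1

def DedupData (data : List (String × List String)) (T : List (String × List String)) : List (String × List String) :=
  let dataD := PySem.Dict.mk data
  let Tt := T.foldl aTtStep PySem.Dict.empty
  let Tmax := Tt.items.foldl (aTmaxStep dataD) PySem.Dict.empty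
  (data.foldl (fun (dd : PySem.Dict String (List String)) (p : String × List String) =>
      if Tmax.contains (some p.1) then dd.insert p.1 p.2 else dd) PySem.Dict.empty).items

-- ===== PORT B =====
-- body of B's single fused pass: title string -> running (selected onion or None, max word count)
def bBestStep (dataD : PySem.Dict String (List String)) (b : PySem.Dict String (Option String × Int)) (p : String × List String) : PySem.Dict String (Option String × Int) :=
  let ts := PySem.Str.join " " p.2
  let sm := b.getD ts ((none : Option String), (0 : Int))
  let n : Int := ((dataD.getD p.1 []).length : Int)
  if n > sm.2 then b.insert ts (some p.1, n) else b.insert ts sm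

-- body of B's set comprehension `{s for s, _ in best.values() if s is not None}`
def bSelAdd (s : PySem.Set String) (q : Option String × Int) : PySem.Set String :=
  match q.1 with
  | some o => s.add o
  | none => s

def DedupData_alt (data : List (String × List String)) (T : List (String × List String)) : List (String × List String) :=
  let dataD := PySem.Dict.mk data
  let best := T.foldl (bBestStep dataD) PySem.Dict.empty
  let selected := best.values.foldl bSelAdd ([] : PySem.Set String)
  (data.foldl (fun (dd : PySem.Dict String (List String)) (p : String × List String) =>
      if selected.contains p.1 then dd.insert p.1 p.2 else dd) PySem.Dict.empty).items

-- ===== PRECONDITION & SPEC =====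
-- Pre_ excludes exactly the inputs where Python A raises KeyError: an onion key of T missing from data.
def Pre_DedupData (data : List (String × List String)) (T : List (String × List String)) : Prop :=
  ∀ p ∈ T, p.1 ∈ data.map Prod.fst
instance (data : List (String × List String)) (T : List (String × List String)) : Decidable (Pre_DedupData data T) := by unfold Pre_DedupData; infer_instance

def pvWitness_DedupData : (List (String × List String)) × (List (String × List String)) :=
  ([("a", ["x", "y"]), ("b", ["x"])], [("a", ["t"]), ("b", ["t"])])

def Spec_DedupData (data : List (String × List String)) (T : List (String × List String)) (out : List (String × List String)) : Prop := out = DedupData_alt data T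
instance (data : List (String × List String)) (T : List (String × List String)) (out : List (String × List String)) : Decidable (Spec_DedupData data T out) := by unfold Spec_DedupData; infer_instance

-- ===== CLAIM (what is proved, stated in full; the proofs are below) =====
def Claim_equal_DedupData : Prop := ∀ (data : List (String × List String)) (T : List (String × List String)), Dom_DedupData data T → Pre_DedupData data T → Spec_DedupData data T (DedupData data T)

-- ===== LEMMAS AND PROOFS =====

-- the title string of a T entry
def tsOf (p : String × List String) : String := PySem.Str.join " " p.2

-- A modify-shaped fold (insert of f applied to the current value) reads back as a fold over the matching entries
theorem getD_foldl_insert_getD {ν β : Type} (key : β → String) (f : ν → β → ν) (d0 : ν)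
    (l : List β) (d : PySem.Dict String ν) (c : String) :
    (l.foldl (fun d p => d.insert (key p) (f (d.getD (key p) d0) p)) d).getD c d0
      = (l.filter (fun p => key p == c)).foldl f (d.getD c d0) := by
  induction l generalizing d with
  | nil => rfl
  | cons x xs ih =>
    simp only [List.foldl_cons, List.filter_cons]
    rw [ih]
    by_cases h : key x = c
    · simp [h]
    · simp [h, PySem.Dict.getD_insert, Ne.symm h]

-- membership in B's set-comprehension fold
theorem mem_selected_fold (vs : List (Option String × Int)) (s : PySem.Set String) (x : String) :
    x ∈ vs.foldl bSelAdd s ↔ x ∈ s ∨ some x ∈ vs.map Prod.fst := by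
  induction vs generalizing s with
  | nil => simp
  | cons q qs ih =>
    cases hq : q.1 with
    | none => simp [List.foldl_cons, ih, bSelAdd, hq]
    | some o =>
      simp only [List.foldl_cons, bSelAdd, hq, ih, PySem.Set.mem_add, List.map_cons,
        List.mem_cons, Option.some_inj]
      tauto

-- A's Tt step in canonical insert-of-getD form
theorem stepA_canon :
    aTtStep = (fun tt p => tt.insert (tsOf p) (tt.getD (tsOf p) [] ++ [p.1])) := by
  funext tt p
  simp only [aTtStep, tsOf]
  by_cases h : tt.contains (PySem.Str.join " " p.2) = true
  · simp [h]
  · simp only [Bool.not_eq_true] at h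
    rw [if_neg (by simp [h]), PySem.Dict.getD_of_not_contains _ _ h]
    simp

-- B's best step in canonical insert-of-getD form, sharing A's inner step
theorem stepB_canon (dataD : PySem.Dict String (List String)) :
    bBestStep dataD
      = (fun b p => b.insert (tsOf p) (aSelStep dataD (b.getD (tsOf p) ((none : Option String), (0 : Int))) p.1)) := by
  funext b p
  simp only [bBestStep, aSelStep, tsOf]
  split <;> rfl

-- the common selection condition: A's Tmax membership = B's selected-set membership
theorem cond_eq (dataD : PySem.Dict String (List String)) (T : List (String × List String)) (o : String) :
    (((T.foldl aTtStep PySem.Dict.empty).items.foldl (aTmaxStep dataD) PySem.Dict.empty).contains (some o))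
    = PySem.Set.contains ((T.foldl (bBestStep dataD) PySem.Dict.empty).values.foldl bSelAdd ([] : PySem.Set String)) o := by
  rw [stepA_canon, stepB_canon]
  have hTtNodup : ((T.foldl (fun tt p => tt.insert (tsOf p) (tt.getD (tsOf p) [] ++ [p.1])) PySem.Dict.empty).keys).Nodup :=
    PySem.Dict.nodup_keys_foldl_insert_key T tsOf _ _ PySem.Dict.nodup_keys_empty
  have hBestNodup : ((T.foldl (fun b p => b.insert (tsOf p) (aSelStep dataD (b.getD (tsOf p) ((none : Option String), (0 : Int))) p.1)) PySem.Dict.empty).keys).Nodup :=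
    PySem.Dict.nodup_keys_foldl_insert_key T tsOf _ _ PySem.Dict.nodup_keys_empty
  have hTtKeys : (T.foldl (fun tt p => tt.insert (tsOf p) (tt.getD (tsOf p) [] ++ [p.1])) PySem.Dict.empty).keys
      = PySem.Set.update ([] : PySem.Set String) (T.map tsOf) := by
    rw [PySem.Dict.keys_foldl_insert_key T tsOf (fun d p => d.getD (tsOf p) [] ++ [p.1])]
    simp
  have hBestKeys : (T.foldl (fun b p => b.insert (tsOf p) (aSelStep dataD (b.getD (tsOf p) ((none : Option String), (0 : Int))) p.1)) PySem.Dict.empty).keys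
      = PySem.Set.update ([] : PySem.Set String) (T.map tsOf) := by
    rw [PySem.Dict.keys_foldl_insert_key T tsOf (fun d p => aSelStep dataD (d.getD (tsOf p) ((none : Option String), (0 : Int))) p.1)]
    simp
  have hTtGet : ∀ c, (T.foldl (fun tt p => tt.insert (tsOf p) (tt.getD (tsOf p) [] ++ [p.1])) PySem.Dict.empty).getD c []
      = (T.filter (fun p => tsOf p == c)).map Prod.fst := by
    intro c
    have h := getD_foldl_insert_getD tsOf (fun v p => v ++ [p.1]) [] T PySem.Dict.empty c
    rw [h, PySem.Dict.getD_empty, PySem.List.foldl_append_singleton_eq_map Prod.fst]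
    simp
  have hBestGet : ∀ c, (T.foldl (fun b p => b.insert (tsOf p) (aSelStep dataD (b.getD (tsOf p) ((none : Option String), (0 : Int))) p.1)) PySem.Dict.empty).getD c ((none : Option String), (0 : Int))
      = (T.filter (fun p => tsOf p == c)).foldl (fun s p => aSelStep dataD s p.1) ((none : Option String), (0 : Int)) := by
    intro c
    have h := getD_foldl_insert_getD tsOf (fun s p => aSelStep dataD s p.1) ((none : Option String), (0 : Int)) T PySem.Dict.empty c
    simpa using h
  rw [Bool.eq_iff_iff]
  -- A side
  have hA : (((T.foldl (fun tt p => tt.insert (tsOf p) (tt.getD (tsOf p) [] ++ [p.1])) PySem.Dict.empty).items.foldl (aTmaxStep dataD) PySem.Dict.empty).contains (some o)) = true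
      ↔ some o ∈ (PySem.Set.update ([] : PySem.Set String) (T.map tsOf)).map
          (fun c => ((T.filter (fun p => tsOf p == c)).foldl (fun s p => aSelStep dataD s p.1) ((none : Option String), (0 : Int))).1) := by
    rw [PySem.Dict.contains_iff_mem_keys]
    have hstep : aTmaxStep dataD = fun tm q => tm.insert ((q.2.foldl (aSelStep dataD) ((none : Option String), (0 : Int))).1) q.1 := rfl
    rw [hstep, PySem.Dict.keys_foldl_insert_key
      ((T.foldl (fun tt p => tt.insert (tsOf p) (tt.getD (tsOf p) [] ++ [p.1])) PySem.Dict.empty).items)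
      (fun (q : String × List String) => ((q.2.foldl (aSelStep dataD) ((none : Option String), (0 : Int))).1))
      (fun (_ : PySem.Dict (Option String) String) (q : String × List String) => q.1) PySem.Dict.empty]
    rw [PySem.Dict.items_eq_map_keys _ hTtNodup []]
    simp only [PySem.Dict.keys_empty, PySem.Set.mem_update, List.not_mem_nil, false_or, List.map_map]
    rw [hTtKeys]
    constructor
    · intro hm
      rcases List.mem_map.mp hm with ⟨c, hc, he⟩
      refine List.mem_map.mpr ⟨c, hc, ?_⟩
      simpa [Function.comp, hTtGet c, List.foldl_map] using he
    · intro hm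
      rcases List.mem_map.mp hm with ⟨c, hc, he⟩
      refine List.mem_map.mpr ⟨c, hc, ?_⟩
      simpa [Function.comp, hTtGet c, List.foldl_map] using he
  -- B side
  have hB : PySem.Set.contains ((T.foldl (fun b p => b.insert (tsOf p) (aSelStep dataD (b.getD (tsOf p) ((none : Option String), (0 : Int))) p.1)) PySem.Dict.empty).values.foldl bSelAdd ([] : PySem.Set String)) o = true
      ↔ some o ∈ (PySem.Set.update ([] : PySem.Set String) (T.map tsOf)).map
          (fun c => ((T.filter (fun p => tsOf p == c)).foldl (fun s p => aSelStep dataD s p.1) ((none : Option String), (0 : Int))).1) := by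
    rw [PySem.Set.contains_iff, mem_selected_fold]
    rw [PySem.Dict.values_eq_map_keys _ hBestNodup ((none : Option String), (0 : Int))]
    rw [hBestKeys]
    simp only [List.not_mem_nil, false_or, List.map_map]
    constructor
    · intro hm
      rcases List.mem_map.mp hm with ⟨c, hc, he⟩
      refine List.mem_map.mpr ⟨c, hc, ?_⟩
      simpa [Function.comp, hBestGet c] using he
    · intro hm
      rcases List.mem_map.mp hm with ⟨c, hc, he⟩
      refine List.mem_map.mpr ⟨c, hc, ?_⟩
      simpa [Function.comp, hBestGet c] using he
  rw [hA, hB]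

-- ===== VERDICT (by name: the statement is the Claim_ definition above) =====
theorem DedupData_spec : Claim_equal_DedupData := by
  intro data T _ _
  unfold Spec_DedupData DedupData DedupData_alt
  simp only []
  congr 1
  apply List.foldl_ext
  intro dd p _
  rw [cond_eq (PySem.Dict.mk data) T p.1]
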